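-- pv_equiv track=rewrite | github.com/kostin-001/yandex_contest | AlgorithmsIntensive/day_1/buy_sell.py | calc_days
-- ===== SOURCE A (Python) =====
-- def calc_days(arr):
--     if len(set(arr)) == 1:
--         return 0, 0
--     min_idx = 0
--     max_idx = 0
--     current_min = 0
--     for i in range(1, len(arr)):
--         if arr[max_idx] * arr[current_min] < arr[min_idx] * arr[i]:  # updating best buy and best sell
--             min_idx = current_min
--             max_idx = i
--         if arr[i] < arr[current_min]:  # updating current min
--             current_min = i
--     min_idx += 1
--     max_idx += 1
--     if min_idx == max_idx:
--         min_idx = max_idx = 0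
--     return min_idx, max_idx
-- ===== SOURCE B (Python) =====
-- def calc_days(arr):
--     n = len(arr)
--     if n > 0 and arr.count(arr[0]) == n:
--         return 0, 0
--     # prefix table: pmin[i] = earliest index of the minimum of arr[0..i]
--     pmin = [0]
--     for i in range(1, n):
--         pmin.append(i if arr[i] < arr[pmin[-1]] else pmin[-1])
--     # candidate (buy, sell) = (pmin[i-1], i); keep the exact cross-multiplied comparison
--     b, s = 0, 0
--     for i in range(1, n):
--         if arr[s] * arr[pmin[i - 1]] < arr[b] * arr[i]:
--             b, s = pmin[i - 1], i
--     return (0, 0) if b == s else (b + 1, s + 1)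
-- ===== Notes on version B (the rewrite author's own statement) =====
-- stated objective: alternative
-- what changed: B replaces A's single fused loop (which interleaves the best-pair update with a running current-min index) by two separate passes: it first materialises a prefix-minimum-index table pmin, checks the all-equal guard via count instead of set, then scans candidates (pmin[i-1], i) keeping the exact cross-multiplied comparison, and returns via arithmetic instead of increment-and-reset.
import Mathlib
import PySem

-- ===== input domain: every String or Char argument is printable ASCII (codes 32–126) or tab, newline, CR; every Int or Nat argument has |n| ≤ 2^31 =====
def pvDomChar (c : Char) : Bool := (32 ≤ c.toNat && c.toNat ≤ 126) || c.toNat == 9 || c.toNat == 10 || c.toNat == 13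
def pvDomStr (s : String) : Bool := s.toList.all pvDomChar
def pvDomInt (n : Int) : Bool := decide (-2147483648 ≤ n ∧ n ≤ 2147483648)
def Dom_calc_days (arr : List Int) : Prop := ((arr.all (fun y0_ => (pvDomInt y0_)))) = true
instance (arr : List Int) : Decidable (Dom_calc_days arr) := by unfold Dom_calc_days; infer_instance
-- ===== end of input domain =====

-- B replaces A's single fused loop by a prefix-minimum-index table plus a candidate scan (objective: alternative decomposition, same cost).

-- ===== PORT A =====
-- loop body of A: state (min_idx, max_idx, current_min)
def pvAStep (arr : List Int) (st : Int × Int × Int) (i : Int) : Int × Int × Int :=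
  let st1 :=
    if PySem.List.pyGetD arr st.2.1 0 * PySem.List.pyGetD arr st.2.2 0 <
       PySem.List.pyGetD arr st.1 0 * PySem.List.pyGetD arr i 0
    then (st.2.2, i, st.2.2) else st
  if PySem.List.pyGetD arr i 0 < PySem.List.pyGetD arr st1.2.2 0 then (st1.1, st1.2.1, i) else st1

def calc_days (arr : List Int) : Int × Int :=
  if (PySem.Set.ofList arr).length = 1 then (0, 0)
  else
    let r := (PySem.List.pyRange 1 (arr.length : Int)).foldl (pvAStep arr) (0, 0, 0)
    let m := r.1 + 1
    let M := r.2.1 + 1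
    if m = M then (0, 0) else (m, M)

-- ===== PORT B =====
-- body of B's pmin-building loop (appends, reading pmin[-1])
def pvPminStep (arr : List Int) (pmin : List Int) (i : Int) : List Int :=
  let last := PySem.List.pyGetD pmin (-1) 0
  pmin ++ [if PySem.List.pyGetD arr i 0 < PySem.List.pyGetD arr last 0 then i else last]

-- body of B's candidate-scan loop: state (b, s), candidate buy = pmin[i-1]
def pvBStep (arr pmin : List Int) (bs : Int × Int) (i : Int) : Int × Int :=
  let cand := PySem.List.pyGetD pmin (i - 1) 0
  if PySem.List.pyGetD arr bs.2 0 * PySem.List.pyGetD arr cand 0 <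
     PySem.List.pyGetD arr bs.1 0 * PySem.List.pyGetD arr i 0
  then (cand, i) else bs

def calc_days_alt (arr : List Int) : Int × Int :=
  let n := (arr.length : Int)
  if 0 < n ∧ PySem.List.count arr (PySem.List.pyGetD arr 0 0) = arr.length then (0, 0)
  else
    let pmin := (PySem.List.pyRange 1 n).foldl (pvPminStep arr) [0]
    let bs := (PySem.List.pyRange 1 n).foldl (pvBStep arr pmin) (0, 0)
    if bs.1 = bs.2 then (0, 0) else (bs.1 + 1, bs.2 + 1)

-- ===== PRECONDITION & SPEC =====
def Spec_calc_days (arr : List Int) (out : Int × Int) : Prop := out = calc_days_alt arr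
instance (arr : List Int) (out : Int × Int) : Decidable (Spec_calc_days arr out) := by unfold Spec_calc_days; infer_instance

-- ===== CLAIM (what is proved, stated in full; the proofs are below) =====
def Claim_equal_calc_days : Prop := ∀ (arr : List Int), Dom_calc_days arr → Spec_calc_days arr (calc_days arr)

-- ===== LEMMAS AND PROOFS =====

-- pf arr j = earliest index of the minimum of arr[0..j] (the value B's pmin table holds at j)
def pvPf (arr : List Int) : Nat → Int
  | 0 => 0
  | j+1 => if PySem.List.pyGetD arr ((j:Int)+1) 0 < PySem.List.pyGetD arr (pvPf arr j) 0
           then ((j:Int)+1) else pvPf arr j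

-- the pmin fold builds exactly the table of pvPf values
theorem pvPmin_eq (arr : List Int) (n : Nat) :
    (PySem.List.pyRange 1 ((n:Int)+1)).foldl (pvPminStep arr) [0]
      = (List.range (n+1)).map (pvPf arr) := by
  induction n with
  | zero => simp [PySem.List.pyRange, pvPf]
  | succ n ih =>
      have h : PySem.List.pyRange 1 ((n:Int)+1+1) = PySem.List.pyRange 1 ((n:Int)+1) ++ [(n:Int)+1] :=
        PySem.List.pyRange_one_succ_right (by omega)
      have hlast : PySem.List.pyGetD ((List.range (n+1)).map (pvPf arr)) (-1) 0 = pvPf arr n := by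
        rw [List.range_succ, List.map_append]
        exact PySem.List.pyGetD_neg_one_append_singleton _ _ _
      push_cast
      rw [h, List.foldl_append, ih]
      rw [List.range_succ (n := n+1), List.map_append]
      simp only [List.foldl_cons, List.foldl_nil, pvPminStep, hlast]
      congr 1

-- the two scans stay in lockstep: A's (min,max) = B's (b,s) and A's current_min = pvPf (k-1)
theorem pvLockstep (arr : List Int) (n k : Nat) (hk : k ≤ n) :
    (PySem.List.pyRange 1 ((k:Int)+1)).foldl (pvAStep arr) (0, 0, 0)
      = (((PySem.List.pyRange 1 ((k:Int)+1)).foldl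
            (pvBStep arr ((List.range (n+1)).map (pvPf arr))) (0, 0)).1,
         ((PySem.List.pyRange 1 ((k:Int)+1)).foldl
            (pvBStep arr ((List.range (n+1)).map (pvPf arr))) (0, 0)).2,
         pvPf arr k) := by
  induction k with
  | zero => simp [PySem.List.pyRange, pvPf]
  | succ k ih =>
      have h : PySem.List.pyRange 1 ((k:Int)+1+1) = PySem.List.pyRange 1 ((k:Int)+1) ++ [(k:Int)+1] :=
        PySem.List.pyRange_one_succ_right (by omega)
      have hcand : PySem.List.pyGetD ((List.range (n+1)).map (pvPf arr)) ((k:Int)+1-1) 0 = pvPf arr k := by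
        have h1 : ((k:Int)+1-1) = ((k:Nat):Int) := by omega
        rw [h1, PySem.List.pyGetD_natCast, PySem.List.getD_map_range _ _ _ _ (by omega)]
      push_cast
      rw [h, List.foldl_append, List.foldl_append, ih (by omega)]
      simp only [List.foldl_cons, List.foldl_nil, pvAStep, pvBStep, hcand]
      split_ifs <;> simp_all [pvPf]

-- the two guards agree
theorem pvGuard_iff (arr : List Int) :
    (PySem.Set.ofList arr).length = 1 ↔
      (0 < (arr.length : Int) ∧ PySem.List.count arr (PySem.List.pyGetD arr 0 0) = arr.length) := by
  constructor
  · intro h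
    obtain ⟨a, ha⟩ := List.length_eq_one_iff.mp h
    have hmem : ∀ x ∈ arr, x = a := by
      intro x hx
      have := (PySem.Set.mem_ofList arr x).mpr hx
      rw [ha] at this; simpa using this
    have hane : a ∈ arr := by
      have : a ∈ PySem.Set.ofList arr := by rw [ha]; simp
      exact (PySem.Set.mem_ofList arr a).mp this
    obtain ⟨y, t, rfl⟩ := List.exists_cons_of_ne_nil (List.ne_nil_of_mem hane)
    have hy : y = a := hmem y (by simp)
    refine ⟨by simp, ?_⟩
    simp only [PySem.List.pyGetD_zero]
    simp only [PySem.List.count]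
    rw [List.count_eq_length]
    intro b hb
    have := hmem b hb
    simp [this, hy]
  · rintro ⟨hne, hcount⟩
    have hnil : arr ≠ [] := by
      intro h; subst h; simp at hne
    set a := PySem.List.pyGetD arr 0 0 with hA
    have hall : ∀ b ∈ arr, a = b := List.count_eq_length.mp hcount
    have hmemS : ∀ x, x ∈ PySem.Set.ofList arr ↔ x = a := by
      intro x
      rw [PySem.Set.mem_ofList]
      constructor
      · intro hx; exact (hall x hx).symm
      · intro hx; subst hx
        have : a ∈ arr := by
          obtain ⟨y, t, rfl⟩ := List.exists_cons_of_ne_nil hnil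
          have : a = y := hall y (by simp)
          simp [this]
        exact this
    have hnd := PySem.Set.nodup_ofList arr
    have haS : a ∈ PySem.Set.ofList arr := (hmemS a).mpr rfl
    obtain ⟨y, t, hY⟩ := List.exists_cons_of_ne_nil (List.ne_nil_of_mem haS)
    rw [hY]
    have hya : y = a := by
      have : y ∈ PySem.Set.ofList arr := by rw [hY]; simp
      exact (hmemS y).mp this
    have ht : t = [] := by
      rcases t with _ | ⟨z, t'⟩
      · rfl
      · exfalso
        have hz : z ∈ PySem.Set.ofList arr := by rw [hY]; simp
        have hza : z = a := (hmemS z).mp hz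
        rw [hY] at hnd
        have := hnd
        simp [hya, hza] at this
    simp [ht]


-- ===== VERDICT (by name: the statement is the Claim_ definition above) =====
theorem calc_days_spec : Claim_equal_calc_days := by
  intro arr _
  unfold Spec_calc_days calc_days calc_days_alt
  by_cases hg : (PySem.Set.ofList arr).length = 1
  · rw [if_pos hg]
    simp only [if_pos ((pvGuard_iff arr).mp hg)]
  · rw [if_neg hg]
    have hg' : ¬ (0 < (arr.length : Int) ∧
        PySem.List.count arr (PySem.List.pyGetD arr 0 0) = arr.length) :=
      fun h => hg ((pvGuard_iff arr).mpr h)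
    simp only [if_neg hg']
    rcases Nat.eq_zero_or_pos arr.length with h0 | hpos
    · obtain rfl : arr = [] := List.eq_nil_of_length_eq_zero h0
      decide
    · obtain ⟨m, hm⟩ : ∃ m, arr.length = m + 1 := ⟨arr.length - 1, by omega⟩
      have hcast : (arr.length : Int) = (m : Int) + 1 := by rw [hm]; push_cast; ring
      rw [hcast, pvPmin_eq arr m, pvLockstep arr m m le_rfl]
      dsimp only
      split_ifs with h1 h2 h2 <;> first | rfl | omega
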